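-- pv_equiv track=rewrite | github.com/Drblessing/leetcode | Daily/07_14_2024.py | parse_chemical_symbol
-- ===== SOURCE A (Python) =====
-- from collections import Counter
--
-- def parse_chemical_symbol(formula: str, n: int) -> tuple:
--     """Parse a chemical symbol and return the index
--     after the symbol and it's string value,
--     and its numeric value"""
--
--     # Get symbol
--     symbol = formula[n]
--     n += 1
--     while n < len(formula) and formula[n].islower():
--         symbol += formula[n]
--         n += 1
--
--     # Get numeric value
--     numeric_string = ""
--     while n < len(formula) and formula[n].isdigit():
--         numeric_string += formula[n]
--         n += 1
--     if not numeric_string: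
--         numeric_string = 1
--
--     c = Counter()
--     c[symbol] = int(numeric_string)
--
--     # Turn counter into a string
--     result_string = ""
--     for key, value in c.items():
--         result_string += key
--         if value != 1:
--             result_string += str(value)
--
--     return result_string, n
-- ===== SOURCE B (Python) =====
-- import re
--
-- # One token = any single character, then a run of lowercase letters, then a run of digits.
-- _TOKEN = re.compile(r'([\s\S][a-z]*)(\d*)')
--
--
-- def parse_chemical_symbol(formula: str, n: int) -> tuple:
--     """Parse a chemical symbol and return the formatted symbol+count
--     string and the index just past the parsed token."""
--     if not 0 <= n < len(formula):
--         raise IndexError("string index out of range")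
--     m = _TOKEN.match(formula, n)
--     symbol, digits = m.group(1), m.group(2)
--     value = int(digits) if digits else 1
--     return (symbol if value == 1 else symbol + str(value)), m.end()
-- ===== Notes on version B (the rewrite author's own statement) =====
-- stated objective: faster
-- what changed: Two hand-written character-by-character while-loops with repeated string concatenation plus a one-entry Counter rendered back to a string are replaced by a single precompiled regex match at offset n whose two groups give the symbol and the digit run directly.
-- outside the precondition, e.g. on parse_chemical_symbol('Ab', -2): A returns ('Ab', 0), B raises IndexError; on parse_chemical_symbol('H2O', 3): A raises IndexError, B raises IndexError
import Mathlib
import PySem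

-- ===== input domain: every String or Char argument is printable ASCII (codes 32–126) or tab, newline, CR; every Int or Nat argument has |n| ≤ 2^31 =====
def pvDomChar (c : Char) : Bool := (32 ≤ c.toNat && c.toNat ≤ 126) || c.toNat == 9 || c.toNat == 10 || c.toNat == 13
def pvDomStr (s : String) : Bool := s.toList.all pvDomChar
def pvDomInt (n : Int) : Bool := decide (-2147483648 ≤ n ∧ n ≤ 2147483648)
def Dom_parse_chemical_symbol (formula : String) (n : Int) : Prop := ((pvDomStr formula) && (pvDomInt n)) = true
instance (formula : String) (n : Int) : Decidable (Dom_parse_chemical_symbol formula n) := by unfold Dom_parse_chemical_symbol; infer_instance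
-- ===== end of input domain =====

-- B replaces A's two hand-written scanning while-loops and the one-entry Counter by a
-- single regex-token parse (ported as char/digit spans over the tail); return values agree on Pre_.

-- ===== PORT A =====
-- while n < len(formula) and formula[n].islower(): symbol += formula[n]; n += 1
def pvASym (cs : List Char) (fuel : Nat) (n : Int) (symbol : List Char) : List Char × Int :=
  match fuel with
  | 0 => (symbol, n)
  | f+1 =>
    if n < (cs.length : Int) then
      match PySem.List.pyGet? cs n with
      | some c =>
          if PySem.Chars.islower c then pvASym cs f (n+1) (symbol ++ [c])
          else (symbol, n)
      | none => (symbol, n)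
    else (symbol, n)

-- while n < len(formula) and formula[n].isdigit(): numeric_string += formula[n]; n += 1
def pvANum (cs : List Char) (fuel : Nat) (n : Int) (num : List Char) : List Char × Int :=
  match fuel with
  | 0 => (num, n)
  | f+1 =>
    if n < (cs.length : Int) then
      match PySem.List.pyGet? cs n with
      | some c =>
          if PySem.Chars.isdigit c then pvANum cs f (n+1) (num ++ [c])
          else (num, n)
      | none => (num, n)
    else (num, n)

def parse_chemical_symbol (formula : String) (n : Int) : String × Int :=
  let cs := formula.toList
  match PySem.List.pyGet? cs n with
  | none => ("", 0)   -- IndexError: formula[n] out of range (outside Pre_)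
  | some c0 =>
    let p1 := pvASym cs cs.length (n + 1) [c0]
    let symbol := p1.1
    let p2 := pvANum cs cs.length p1.2 []
    let num := p2.1
    -- if not numeric_string: numeric_string = 1; int(numeric_string)
    let value : Int := if num.isEmpty then 1 else (PySem.Int.ofChars? num).getD 0
    -- c = Counter(); c[symbol] = value
    let d : PySem.Dict (List Char) Int := (PySem.Dict.empty).insert symbol value
    -- for key, value in c.items(): result += key; if value != 1: result += str(value)
    let result := d.items.foldl
      (fun acc kv => (acc ++ kv.1) ++ (if kv.2 ≠ 1 then PySem.Int.toChars kv.2 else [])) []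
    (String.mk result, p2.2)

-- ===== PORT B =====
-- regex ([\s\S][a-z]*)(\d*) matched at offset n: one char, a lowercase run, a digit run
def parse_chemical_symbol_alt (formula : String) (n : Int) : String × Int :=
  let cs := formula.toList
  if 0 ≤ n ∧ n < (cs.length : Int) then
    match cs.drop n.toNat with
    | [] => ("", 0)   -- unreachable: n < len
    | c :: rest =>
      let lows := rest.takeWhile PySem.Chars.islower
      let digits := (rest.drop lows.length).takeWhile PySem.Chars.isdigit
      let symbol := c :: lows
      let value : Int := if digits.isEmpty then 1 else (PySem.Int.ofChars? digits).getD 0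
      let stop : Int := n + 1 + lows.length + digits.length
      ((if value = 1 then String.mk symbol else String.mk (symbol ++ PySem.Int.toChars value)), stop)
  else ("", 0)   -- raise IndexError (outside Pre_)

-- ===== PRECONDITION & SPEC =====
-- Pre_ excludes n ≥ len(formula) or n < -len(formula), where A raises IndexError, and negative
-- in-range n, where A's value mixes wrapped-around characters with a rescan from index 0 — an
-- accident of Python negative indexing; B's offset-based parser raises IndexError on those inputs.
def Pre_parse_chemical_symbol (formula : String) (n : Int) : Prop :=
  0 ≤ n ∧ n < (formula.toList.length : Int)
instance (formula : String) (n : Int) : Decidable (Pre_parse_chemical_symbol formula n) := by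
  unfold Pre_parse_chemical_symbol; infer_instance

def pvWitness_parse_chemical_symbol : String × Int := ("H2O", 0)

def Spec_parse_chemical_symbol (formula : String) (n : Int) (out : String × Int) : Prop := out = parse_chemical_symbol_alt formula n
instance (formula : String) (n : Int) (out : String × Int) : Decidable (Spec_parse_chemical_symbol formula n out) := by unfold Spec_parse_chemical_symbol; infer_instance

-- ===== CLAIM (what is proved, stated in full; the proofs are below) =====
def Claim_equal_parse_chemical_symbol : Prop := ∀ (formula : String) (n : Int), Dom_parse_chemical_symbol formula n → Pre_parse_chemical_symbol formula n → Spec_parse_chemical_symbol formula n (parse_chemical_symbol formula n)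

-- ===== LEMMAS AND PROOFS =====

theorem pvASym_spec (cs : List Char) : ∀ (fuel i : Nat) (acc : List Char),
    cs.length ≤ fuel + i →
    pvASym cs fuel (i : Int) acc =
      (acc ++ (cs.drop i).takeWhile PySem.Chars.islower,
       (i : Int) + ((cs.drop i).takeWhile PySem.Chars.islower).length) := by
  intro fuel
  induction fuel with
  | zero =>
    intro i acc h
    have hd : cs.drop i = [] := List.drop_eq_nil_of_le (by omega)
    simp [pvASym, hd]
  | succ f ih =>
    intro i acc h
    by_cases hi : i < cs.length
    · have hget : PySem.List.pyGet? cs (i : Int) = some cs[i] := by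
        simp [PySem.List.pyGet?_natCast, hi, List.getElem?_eq_getElem]
      have hd : cs.drop i = cs[i] :: cs.drop (i+1) := List.drop_eq_getElem_cons hi
      have hlt : (i : Int) < (cs.length : Int) := by exact_mod_cast hi
      by_cases hl : PySem.Chars.islower cs[i]
      · have hrec := ih (i+1) (acc ++ [cs[i]]) (by omega)
        simp only [pvASym]
        rw [if_pos hlt, hget]
        simp only [hl, if_true]
        rw [show ((i : Int) + 1) = ((i+1 : Nat) : Int) by push_cast; ring, hrec, hd,
            List.takeWhile_cons_of_pos hl]
        simp only [Prod.mk.injEq]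
        refine ⟨by simp, by simp only [List.length_cons]; push_cast; ring⟩
      · simp only [pvASym]
        rw [if_pos hlt, hget]
        simp only [hl, if_false]
        rw [hd, List.takeWhile_cons_of_neg hl]
        simp
    · have hd : cs.drop i = [] := List.drop_eq_nil_of_le (by omega)
      have hlt : ¬ (i : Int) < (cs.length : Int) := by
        intro hc; exact hi (by exact_mod_cast hc)
      simp only [pvASym]
      rw [if_neg hlt, hd]
      simp

theorem pvANum_spec (cs : List Char) : ∀ (fuel i : Nat) (acc : List Char),
    cs.length ≤ fuel + i →
    pvANum cs fuel (i : Int) acc =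
      (acc ++ (cs.drop i).takeWhile PySem.Chars.isdigit,
       (i : Int) + ((cs.drop i).takeWhile PySem.Chars.isdigit).length) := by
  intro fuel
  induction fuel with
  | zero =>
    intro i acc h
    have hd : cs.drop i = [] := List.drop_eq_nil_of_le (by omega)
    simp [pvANum, hd]
  | succ f ih =>
    intro i acc h
    by_cases hi : i < cs.length
    · have hget : PySem.List.pyGet? cs (i : Int) = some cs[i] := by
        simp [PySem.List.pyGet?_natCast, hi, List.getElem?_eq_getElem]
      have hd : cs.drop i = cs[i] :: cs.drop (i+1) := List.drop_eq_getElem_cons hi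
      have hlt : (i : Int) < (cs.length : Int) := by exact_mod_cast hi
      by_cases hl : PySem.Chars.isdigit cs[i]
      · have hrec := ih (i+1) (acc ++ [cs[i]]) (by omega)
        simp only [pvANum]
        rw [if_pos hlt, hget]
        simp only [hl, if_true]
        rw [show ((i : Int) + 1) = ((i+1 : Nat) : Int) by push_cast; ring, hrec, hd,
            List.takeWhile_cons_of_pos hl]
        simp only [Prod.mk.injEq]
        refine ⟨by simp, by simp only [List.length_cons]; push_cast; ring⟩
      · simp only [pvANum]
        rw [if_pos hlt, hget]
        simp only [hl, if_false]
        rw [hd, List.takeWhile_cons_of_neg hl]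
        simp
    · have hd : cs.drop i = [] := List.drop_eq_nil_of_le (by omega)
      have hlt : ¬ (i : Int) < (cs.length : Int) := by
        intro hc; exact hi (by exact_mod_cast hc)
      simp only [pvANum]
      rw [if_neg hlt, hd]
      simp

-- ===== VERDICT (by name: the statement is the Claim_ definition above) =====
theorem parse_chemical_symbol_spec : Claim_equal_parse_chemical_symbol := by
  intro formula n _hdom hpre
  obtain ⟨hn0, hnlt⟩ := hpre
  unfold Spec_parse_chemical_symbol
  obtain ⟨m, rfl⟩ : ∃ m : Nat, n = (m : Int) := ⟨n.toNat, (Int.toNat_of_nonneg hn0).symm⟩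
  have hm : m < formula.toList.length := by exact_mod_cast hnlt
  have hget : PySem.List.pyGet? formula.toList (m : Int) = some formula.toList[m] := by
    simp [hm]
  have hd : formula.toList.drop m = formula.toList[m] :: formula.toList.drop (m+1) :=
    List.drop_eq_getElem_cons hm
  have hsym : pvASym formula.toList formula.toList.length ((m : Int) + 1) [formula.toList[m]]
      = ([formula.toList[m]] ++ (formula.toList.drop (m+1)).takeWhile PySem.Chars.islower,
         ((m+1 : Nat) : Int) + ((formula.toList.drop (m+1)).takeWhile PySem.Chars.islower).length) := by
    rw [show ((m : Int) + 1) = ((m+1 : Nat) : Int) by push_cast; ring]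
    exact pvASym_spec _ _ _ _ (by omega)
  set lows := (formula.toList.drop (m+1)).takeWhile PySem.Chars.islower with hlows
  have hnum : pvANum formula.toList formula.toList.length (((m+1 : Nat) : Int) + (lows.length : Int)) []
      = ([] ++ (formula.toList.drop (m+1+lows.length)).takeWhile PySem.Chars.isdigit,
         ((m+1+lows.length : Nat) : Int) + ((formula.toList.drop (m+1+lows.length)).takeWhile PySem.Chars.isdigit).length) := by
    rw [show ((m+1 : Nat) : Int) + (lows.length : Int) = ((m+1+lows.length : Nat) : Int) by push_cast; ring]
    exact pvANum_spec _ _ _ _ (by omega)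
  set digits := (formula.toList.drop (m+1+lows.length)).takeWhile PySem.Chars.isdigit with hdigits
  have hpos : (0 : Int) ≤ (m : Int) ∧ (m : Int) < (formula.toList.length : Int) :=
    ⟨by positivity, by exact_mod_cast hm⟩
  simp only [parse_chemical_symbol, parse_chemical_symbol_alt, hget, hsym, hnum,
    if_pos hpos, Int.toNat_natCast, hd]
  simp only [List.nil_append, List.singleton_append]
  rw [List.drop_drop]
  simp only [← hlows]
  rw [← hdigits]
  have hitems : ((PySem.Dict.empty : PySem.Dict (List Char) Int).insert (formula.toList[m] :: lows)
      (if digits.isEmpty then 1 else (PySem.Int.ofChars? digits).getD 0)).items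
      = [((formula.toList[m] :: lows), (if digits.isEmpty then (1 : Int) else (PySem.Int.ofChars? digits).getD 0))] := by
    simp [PySem.Dict.empty, PySem.Dict.insert, PySem.Dict.items]
  rw [hitems]
  simp only [List.foldl, List.nil_append]
  by_cases hv : (if digits.isEmpty then (1 : Int) else (PySem.Int.ofChars? digits).getD 0) = 1
  · rw [if_pos hv]
    simp only [hv, ne_eq, not_true_eq_false, if_false, List.append_nil, Prod.mk.injEq]
    refine ⟨trivial, by push_cast; ring⟩
  · rw [if_neg hv]
    simp only [ne_eq, hv, not_false_eq_true, if_true, Prod.mk.injEq]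
    refine ⟨trivial, by push_cast; ring⟩
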